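-- pv_equiv track=rewrite | github.com/981377660LMT/algorithm-study | 20_杂题/atc競プロ/AtCoder Beginner Contest/196/E - Filters.py | clampComposition
-- ===== SOURCE A (Python) =====
-- from typing import List, Tuple
--
-- INF = int(1e18)
--
-- def composition(f: "Func", g: "Func") -> "Func":
--     a1, b1, c1 = f
--     a2, b2, c2 = g
--     return a1 + a2, max(b2, b1 + a2), min(c2, max(b2, c1 + a2))
--
-- def cal(f: "Func", x: int) -> int:
--     a, b, c = f
--     return min(c, max(b, x + a))
--
-- def clampComposition(funcs: List[Tuple[int, int]], queries: List[int]) -> List[int]: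
--     f = (0, -INF, INF)  # f(x) = x
--     for a, kind in funcs:
--         if kind == 1:
--             f = composition(f, (a, -INF, INF))
--         elif kind == 2:
--             f = composition(f, (0, a, INF))
--         else:
--             f = composition(f, (0, -INF, a))
--
--     return [cal(f, x) for x in queries]
-- ===== SOURCE B (Python) =====
-- INF = int(1e18)
--
-- def clampComposition(funcs, queries):
--     res = []
--     for x in queries:
--         y = x
--         for a, kind in funcs:
--             if kind == 1:
--                 y = min(INF, max(-INF, y + a))
--             elif kind == 2:
--                 y = min(INF, max(a, y))
--             else:
--                 y = min(a, max(-INF, y))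
--         res.append(y)
--     return res
-- ===== Notes on version B (the rewrite author's own statement) =====
-- stated objective: alternative
-- what changed: B drops the precomputed composed (a,b,c) filter and the composition/cal helpers: for each query it scans the filter list once, applying each filter's clamp function (add / max / min against the same +-INF bounds) directly to the running value.
import Mathlib
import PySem

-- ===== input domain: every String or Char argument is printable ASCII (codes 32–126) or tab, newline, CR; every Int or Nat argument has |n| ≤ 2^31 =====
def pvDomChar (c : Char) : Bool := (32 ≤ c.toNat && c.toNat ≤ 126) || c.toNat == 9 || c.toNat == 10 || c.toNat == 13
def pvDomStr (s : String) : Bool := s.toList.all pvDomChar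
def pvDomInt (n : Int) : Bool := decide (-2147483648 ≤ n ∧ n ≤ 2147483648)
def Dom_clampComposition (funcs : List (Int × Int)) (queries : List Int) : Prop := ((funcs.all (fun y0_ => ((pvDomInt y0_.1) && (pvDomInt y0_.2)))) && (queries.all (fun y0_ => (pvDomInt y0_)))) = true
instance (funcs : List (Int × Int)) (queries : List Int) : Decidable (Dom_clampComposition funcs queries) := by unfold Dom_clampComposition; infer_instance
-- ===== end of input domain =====

-- B replaces A's precomputed composed (a,b,c) filter by a direct per-query scan that
-- applies each filter's clamp function (against the same ±INF bounds) to the running value;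
-- same results, different algorithm (alternative decomposition, not faster).

-- ===== PORT A =====
def pvINF : Int := 1000000000000000000

def composition (f g : Int × Int × Int) : Int × Int × Int :=
  (f.1 + g.1, max g.2.1 (f.2.1 + g.1), min g.2.2 (max g.2.1 (f.2.2 + g.1)))

def cal (f : Int × Int × Int) (x : Int) : Int :=
  min f.2.2 (max f.2.1 (x + f.1))

def clampStep (f : Int × Int × Int) (p : Int × Int) : Int × Int × Int :=
  if p.2 == 1 then composition f (p.1, -pvINF, pvINF)
  else if p.2 == 2 then composition f (0, p.1, pvINF)
  else composition f (0, -pvINF, p.1)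

def clampComposition (funcs : List (Int × Int)) (queries : List Int) : List Int :=
  let f := funcs.foldl clampStep (0, -pvINF, pvINF)
  queries.map (fun x => cal f x)

-- ===== PORT B =====
def applyFilter (y : Int) (p : Int × Int) : Int :=
  if p.2 == 1 then min pvINF (max (-pvINF) (y + p.1))
  else if p.2 == 2 then min pvINF (max p.1 y)
  else min p.1 (max (-pvINF) y)

def clampComposition_alt (funcs : List (Int × Int)) (queries : List Int) : List Int :=
  queries.map (fun x => funcs.foldl applyFilter x)

-- ===== PRECONDITION & SPEC =====
def Spec_clampComposition (funcs : List (Int × Int)) (queries : List Int) (out : List Int) : Prop := out = clampComposition_alt funcs queries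
instance (funcs : List (Int × Int)) (queries : List Int) (out : List Int) : Decidable (Spec_clampComposition funcs queries out) := by unfold Spec_clampComposition; infer_instance

-- ===== CLAIM (what is proved, stated in full; the proofs are below) =====
def Claim_equal_clampComposition : Prop := ∀ (funcs : List (Int × Int)) (queries : List Int), Dom_clampComposition funcs queries → Spec_clampComposition funcs queries (clampComposition funcs queries)

-- ===== LEMMAS AND PROOFS =====

-- composing filters then clamping equals clamping through each filter in turn
theorem cal_composition (f g : Int × Int × Int) (x : Int) :
    cal (composition f g) x = cal g (cal f x) := by
  obtain ⟨a1, b1, c1⟩ := f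
  obtain ⟨a2, b2, c2⟩ := g
  simp only [cal, composition]
  omega

-- one A-step then clamping equals clamping then one B-step
theorem cal_clampStep (f : Int × Int × Int) (p : Int × Int) (x : Int) :
    cal (clampStep f p) x = applyFilter (cal f x) p := by
  unfold clampStep applyFilter
  split_ifs <;> rw [cal_composition] <;> simp [cal]

theorem cal_foldl (funcs : List (Int × Int)) (f : Int × Int × Int) (x : Int) :
    cal (funcs.foldl clampStep f) x = funcs.foldl applyFilter (cal f x) := by
  induction funcs generalizing f x with
  | nil => rfl
  | cons p rest ih =>
      simp only [List.foldl_cons, ih, cal_clampStep]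

theorem cal_id (x : Int) (h1 : -2147483648 ≤ x) (h2 : x ≤ 2147483648) :
    cal (0, -pvINF, pvINF) x = x := by
  simp only [cal, pvINF]
  omega

-- ===== VERDICT (by name: the statement is the Claim_ definition above) =====
theorem clampComposition_spec : Claim_equal_clampComposition := by
  intro funcs queries hdom
  unfold Spec_clampComposition clampComposition clampComposition_alt
  simp only [Dom_clampComposition, Bool.and_eq_true, List.all_eq_true, pvDomInt,
    decide_eq_true_eq] at hdom
  apply List.map_congr_left
  intro x hx
  obtain ⟨h1, h2⟩ := hdom.2 x hx
  rw [cal_foldl, cal_id x h1 h2]
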